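-- pv_equiv track=rewrite | github.com/codingwatching/skyvern | skyvern/schemas/google_sheets.py | strip_a1_sheet_prefix
-- ===== SOURCE A (Python) =====
-- def strip_a1_sheet_prefix(a1: str) -> str:
--     if a1.startswith("'"):
--         idx = 1
--         while idx < len(a1):
--             if a1[idx] == "'":
--                 if idx + 1 < len(a1) and a1[idx + 1] == "'":
--                     idx += 2
--                     continue
--                 break
--             idx += 1
--         if idx < len(a1) and idx + 1 < len(a1) and a1[idx + 1] == "!":
--             return a1[idx + 2 :]
--     if "!" in a1:
--         return a1.rsplit("!", 1)[1]
--     return a1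
-- ===== SOURCE B (Python) =====
-- def strip_a1_sheet_prefix(a1: str) -> str:
--     if a1.startswith("'"):
--         body = a1[1:]
--         consumed = 0
--         for seg in body.split("''"):
--             q = seg.find("'")
--             if q != -1:
--                 end = consumed + q
--                 if body[end:end + 2] == "'!":
--                     return body[end + 2:]
--                 break
--             consumed += len(seg) + 2
--     return a1.rsplit("!", 1)[-1]
-- ===== Notes on version B (the rewrite author's own statement) =====
-- stated objective: alternative
-- what changed: A walks the quoted prefix character by character with an index, pairing doubled-quote escapes inline during the scan; B removes the escape handling from the scan entirely by splitting the body once on the two-character doubled-quote escape sequence, so the first unescaped quote is simply the first quote of any segment, checked with one slice comparison, and the fallback is a single unconditional rsplit.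
import Mathlib
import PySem

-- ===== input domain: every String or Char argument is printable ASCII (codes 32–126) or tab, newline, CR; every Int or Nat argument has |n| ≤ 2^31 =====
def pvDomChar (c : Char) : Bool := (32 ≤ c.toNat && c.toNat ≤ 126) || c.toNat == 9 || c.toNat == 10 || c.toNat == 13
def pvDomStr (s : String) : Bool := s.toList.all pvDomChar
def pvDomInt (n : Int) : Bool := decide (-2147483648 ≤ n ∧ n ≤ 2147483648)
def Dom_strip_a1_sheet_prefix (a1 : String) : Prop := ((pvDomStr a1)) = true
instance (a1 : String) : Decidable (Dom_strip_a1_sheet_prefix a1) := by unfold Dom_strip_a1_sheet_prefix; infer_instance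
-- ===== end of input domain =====

-- B replaces A's inline escape-pairing index scan by splitting the body once on the doubled-quote
-- escape sequence and checking the first quote of any segment: alternative decomposition, same cost.

-- ===== PORT A =====
-- A's while loop: advances idx exactly as the Python loop does and returns the final idx
def pvALoop (cs : List Char) (idx : Nat) : Nat :=
  if idx < cs.length then
    if cs.getD idx ' ' = '\'' then
      if idx + 1 < cs.length ∧ cs.getD (idx + 1) ' ' = '\'' then pvALoop cs (idx + 2)
      else idx
    else pvALoop cs (idx + 1)
  else idx
termination_by cs.length - idx

-- chars after the last '!' of cs; exact port of a1.rsplit("!", 1)[1] when '!' is in a1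
def pvAfterLastBang (cs : List Char) : List Char := (cs.reverse.takeWhile (· ≠ '!')).reverse

def strip_a1_sheet_prefix (a1 : String) : String :=
  let cs := a1.toList
  let quoted : Option (List Char) :=
    if cs.headD ' ' = '\'' ∧ cs ≠ [] then   -- a1.startswith("'")
      let idx := pvALoop cs 1
      if idx < cs.length ∧ idx + 1 < cs.length ∧ cs.getD (idx + 1) ' ' = '!' then
        some (cs.drop (idx + 2))            -- return a1[idx + 2:]
      else none
    else none
  match quoted with
  | some r => String.ofList r
  | none =>                                 -- if "!" in a1: return a1.rsplit("!", 1)[1]; return a1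
    if cs.contains '!' then String.ofList (pvAfterLastBang cs) else a1

-- ===== PORT B =====
-- body.split on the doubled-quote escape: leftmost non-overlapping split on the two-char separator
def pvSplitQQ : List Char → List (List Char)
  | [] => [[]]
  | '\'' :: '\'' :: r => [] :: pvSplitQQ r
  | c :: r =>
    match pvSplitQQ r with
    | h :: t => (c :: h) :: t
    | [] => [[c]]   -- unreachable: pvSplitQQ never returns []

-- B's for loop over the segments, with the running offset 'consumed' into body
def pvBSegLoop (body : List Char) : List (List Char) → Nat → Option (List Char)
  | [], _ => none
  | seg :: rest, consumed =>
    match seg.findIdx? (· = '\'') with          -- q = seg.find("'")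
    | some q =>
        if (body.drop (consumed + q)).take 2 = ['\'', '!']   -- body[end:end+2] == "'!"
        then some (body.drop (consumed + q + 2))              -- return body[end+2:]
        else none                                             -- break
    | none => pvBSegLoop body rest (consumed + seg.length + 2)

def strip_a1_sheet_prefix_alt (a1 : String) : String :=
  let cs := a1.toList
  let fromSheet : Option (List Char) :=
    if cs.headD ' ' = '\'' ∧ cs ≠ [] then   -- a1.startswith("'")
      pvBSegLoop cs.tail (pvSplitQQ cs.tail) 0
    else none
  match fromSheet with
  | some r => String.ofList r
  | none =>                                 -- return a1.rsplit("!", 1)[-1]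
    String.ofList ((cs.reverse.takeWhile (· ≠ '!')).reverse)

-- ===== PRECONDITION & SPEC =====
def Spec_strip_a1_sheet_prefix (a1 : String) (out : String) : Prop := out = strip_a1_sheet_prefix_alt a1
instance (a1 : String) (out : String) : Decidable (Spec_strip_a1_sheet_prefix a1 out) := by unfold Spec_strip_a1_sheet_prefix; infer_instance

-- ===== CLAIM (what is proved, stated in full; the proofs are below) =====
def Claim_equal_strip_a1_sheet_prefix : Prop := ∀ (a1 : String), Dom_strip_a1_sheet_prefix a1 → Spec_strip_a1_sheet_prefix a1 (strip_a1_sheet_prefix a1)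

-- ===== LEMMAS AND PROOFS =====

-- proof-only intermediate: a jumpy scan equivalent to both loops
def pvJump (s : List Char) : Option (List Char) :=
  match h : s.dropWhile (· ≠ '\'') with
  | [] => none
  | '\'' :: '\'' :: rest => pvJump rest
  | '\'' :: '!' :: rest => some rest
  | _ => none
termination_by s.length
decreasing_by
  have hle : (s.dropWhile (· ≠ '\'')).length ≤ s.length := List.length_dropWhile_le _ _
  rw [h] at hle; simp at hle; omega

lemma pvJump_of_nil {s : List Char} (hs : s.dropWhile (· ≠ '\'') = []) : pvJump s = none := by
  rw [pvJump]; split <;> rename_i heq <;> rw [hs] at heq <;> simp_all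

lemma pvJump_of_qq {s r : List Char} (hs : s.dropWhile (· ≠ '\'') = '\'' :: '\'' :: r) :
    pvJump s = pvJump r := by
  rw [pvJump]; split <;> rename_i heq <;> rw [hs] at heq <;> simp_all

lemma pvJump_of_qbang {s r : List Char} (hs : s.dropWhile (· ≠ '\'') = '\'' :: '!' :: r) :
    pvJump s = some r := by
  rw [pvJump]; split <;> rename_i heq <;> rw [hs] at heq <;> simp_all

lemma pvJump_of_q_nil {s : List Char} (hs : s.dropWhile (· ≠ '\'') = ['\'']) :
    pvJump s = none := by
  rw [pvJump]; split <;> rename_i heq <;> rw [hs] at heq <;> simp_all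

lemma pvJump_of_q_other {s r : List Char} {c : Char} (hq : c ≠ '\'') (hb : c ≠ '!')
    (hs : s.dropWhile (· ≠ '\'') = '\'' :: c :: r) : pvJump s = none := by
  rw [pvJump]; split <;> rename_i heq <;> rw [hs] at heq <;> simp_all

lemma pvJump_cons_ne {c : Char} (hc : c ≠ '\'') (t : List Char) :
    pvJump (c :: t) = pvJump t := by
  have hd : (c :: t).dropWhile (· ≠ '\'') = t.dropWhile (· ≠ '\'') := by
    simp [hc]
  conv_lhs => rw [pvJump]
  split <;> rename_i heq <;> rw [hd] at heq
  · exact (pvJump_of_nil heq).symm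
  · exact (pvJump_of_qq heq).symm
  · exact (pvJump_of_qbang heq).symm
  · rw [pvJump]; split <;> rename_i heq2 <;> simp_all

lemma pvJump_qq (r : List Char) : pvJump ('\'' :: '\'' :: r) = pvJump r :=
  pvJump_of_qq (by simp)

lemma pvJump_qbang (r : List Char) : pvJump ('\'' :: '!' :: r) = some r :=
  pvJump_of_qbang (by simp)

lemma pvJump_q_sing : pvJump ['\''] = none :=
  pvJump_of_q_nil (by simp)

lemma pvJump_q_other {c : Char} (hq : c ≠ '\'') (hb : c ≠ '!') (r : List Char) :
    pvJump ('\'' :: c :: r) = none :=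
  pvJump_of_q_other (r := r) hq hb (by simp)

lemma pvSplitQQ_cons (c : Char) (r : List Char)
    (h1 : ∀ (r' : List Char), c = '\'' → r = '\'' :: r' → False) :
    pvSplitQQ (c :: r) = match pvSplitQQ r with
      | h :: t => (c :: h) :: t
      | [] => [[c]] := by
  rw [pvSplitQQ.eq_def]
  split
  · simp_all
  · rename_i heq; injection heq with e1 e2; subst e1; subst e2
    exact absurd (h1 _ rfl rfl) not_false
  · rename_i heq; injection heq with e1 e2; subst e1; subst e2; rfl

lemma pvSplitQQ_ne_nil (s : List Char) : pvSplitQQ s ≠ [] := by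
  induction s using pvSplitQQ.induct with
  | case1 => simp [pvSplitQQ]
  | case2 r ih => simp [pvSplitQQ]
  | case3 c r h1 h t heq ih => rw [pvSplitQQ_cons c r h1, heq]; simp
  | case4 c r h1 heq => rw [pvSplitQQ_cons c r h1, heq]; simp

-- heart 1: A's final idx, tested and sliced as A does it, coincides with pvJump on the suffix
lemma pvALoop_pvJump (cs : List Char) :
    ∀ n idx, cs.length - idx ≤ n →
    (if pvALoop cs idx < cs.length ∧ pvALoop cs idx + 1 < cs.length ∧
        cs.getD (pvALoop cs idx + 1) ' ' = '!'
     then some (cs.drop (pvALoop cs idx + 2)) else none) = pvJump (cs.drop idx) := by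
  intro n
  induction n with
  | zero =>
    intro idx hn
    have hge : cs.length ≤ idx := by omega
    have ha : pvALoop cs idx = idx := by rw [pvALoop]; simp [Nat.not_lt.mpr hge]
    have hdrop : cs.drop idx = [] := List.drop_eq_nil_of_le hge
    rw [hdrop, pvJump_of_nil (by simp), ha, if_neg (by omega)]
  | succ n ih =>
    intro idx hn
    by_cases hlt : idx < cs.length
    · have hgetD : cs.getD idx ' ' = cs[idx] := List.getD_eq_getElem cs ' ' hlt
      have hdropc : cs.drop idx = cs[idx] :: cs.drop (idx + 1) := List.drop_eq_getElem_cons hlt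
      by_cases hq : cs[idx] = '\''
      · by_cases hdb : idx + 1 < cs.length ∧ cs.getD (idx + 1) ' ' = '\''
        · have ha : pvALoop cs idx = pvALoop cs (idx + 2) := by
            rw [pvALoop, if_pos hlt, if_pos (show cs.getD idx ' ' = '\'' by rw [hgetD, hq]),
              if_pos hdb]
          have hget1 : cs[idx + 1]'hdb.1 = '\'' := by
            rw [← List.getD_eq_getElem cs ' ' hdb.1]; exact hdb.2
          have e1 : cs.drop (idx + 1) = cs[idx + 1] :: cs.drop (idx + 2) :=
            List.drop_eq_getElem_cons hdb.1
          have hdrop2 : cs.drop idx = '\'' :: '\'' :: cs.drop (idx + 2) := by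
            rw [hdropc, hq, e1, hget1]
          rw [ha, hdrop2, pvJump_qq]
          exact ih (idx + 2) (by omega)
        · have ha : pvALoop cs idx = idx := by
            rw [pvALoop, if_pos hlt, if_pos (show cs.getD idx ' ' = '\'' by rw [hgetD, hq]),
              if_neg hdb]
          rw [ha]
          by_cases h1 : idx + 1 < cs.length
          · have hget1 : cs.getD (idx + 1) ' ' = cs[idx + 1] := List.getD_eq_getElem cs ' ' h1
            have e1 : cs.drop (idx + 1) = cs[idx + 1] :: cs.drop (idx + 2) :=
              List.drop_eq_getElem_cons h1
            have hdrop2 : cs.drop idx = '\'' :: cs[idx + 1] :: cs.drop (idx + 2) := by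
              rw [hdropc, hq, e1]
            have hnq : cs[idx + 1] ≠ '\'' := fun h => hdb ⟨h1, by rw [hget1, h]⟩
            by_cases hbang : cs[idx + 1] = '!'
            · rw [hdrop2, hbang, pvJump_qbang]
              rw [if_pos ⟨hlt, h1, by rw [hget1, hbang]⟩]
            · rw [hdrop2, pvJump_q_other hnq hbang]
              rw [if_neg (by rw [hget1]; tauto)]
          · have hdrop2 : cs.drop idx = ['\''] := by
              rw [hdropc, hq, List.drop_eq_nil_of_le (by omega)]
            rw [hdrop2, pvJump_q_sing]
            rw [if_neg (by omega)]
      · have ha : pvALoop cs idx = pvALoop cs (idx + 1) := by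
          rw [pvALoop]; simp [hlt, hq]
        rw [ha, hdropc, pvJump_cons_ne hq]
        exact ih (idx + 1) (by omega)
    · have hge : cs.length ≤ idx := by omega
      have ha : pvALoop cs idx = idx := by rw [pvALoop]; simp [Nat.not_lt.mpr hge]
      have hdrop : cs.drop idx = [] := List.drop_eq_nil_of_le hge
      rw [hdrop, pvJump_of_nil (by simp), ha, if_neg (by omega)]


-- shifting one non-quote char from body into the leading segment shifts the offset by one
lemma pvBSegLoop_shift (body : List Char) (c : Char) (hc : c ≠ '\'') (h : List Char)
    (t : List (List Char)) (consumed : Nat) :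
    pvBSegLoop body ((c :: h) :: t) consumed = pvBSegLoop body (h :: t) (consumed + 1) := by
  rw [pvBSegLoop, pvBSegLoop, List.findIdx?_cons]
  simp only [hc, decide_false, Bool.false_eq_true, if_false]
  cases hf : h.findIdx? (· = '\'') with
  | none =>
      simp only [Option.map_none, List.length_cons]
      have e : consumed + (h.length + 1) + 2 = consumed + 1 + h.length + 2 := by omega
      rw [e]
  | some q =>
      simp only [Option.map_some]
      have e1 : consumed + (q + 1) = consumed + 1 + q := by omega
      rw [e1]

-- heart 2: B's segment walk over pvSplitQQ s is pvJump s, whenever body.drop consumed = s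
lemma pvBSegLoop_pvJump (body : List Char) :
    ∀ s, ∀ consumed, body.drop consumed = s →
    pvBSegLoop body (pvSplitQQ s) consumed = pvJump s := by
  intro s
  induction s using pvSplitQQ.induct with
  | case1 =>
    intro consumed _
    rw [pvSplitQQ, pvBSegLoop, pvBSegLoop]
    simp [pvJump_of_nil (s := ([] : List Char)) (by simp)]
  | case2 r ih =>
    intro consumed hdrop
    rw [pvSplitQQ, pvBSegLoop]
    simp only [List.findIdx?_nil, List.length_nil]
    have hr : body.drop (consumed + 2) = r := by
      have e : body.drop (consumed + 2) = (body.drop consumed).drop 2 := by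
        rw [List.drop_drop]
      rw [e, hdrop]; simp
    rw [ih (consumed + 2) hr, pvJump_qq]
  | case4 c r h1 heq => exact absurd heq (pvSplitQQ_ne_nil r)
  | case3 c r h1 h t heq ih =>
    intro consumed hdrop
    rw [pvSplitQQ_cons c r h1, heq]
    by_cases hq : c = '\''
    · subst hq
      rw [pvBSegLoop]
      have hfi : ('\'' :: h).findIdx? (· = '\'') = some 0 := by
        rw [List.findIdx?_cons]; simp
      rw [hfi]
      simp only [Nat.add_zero]
      rw [hdrop]
      match r with
      | [] => simp [pvJump_q_sing]
      | '!' :: r2 =>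
        rw [pvJump_qbang]
        have e : body.drop (consumed + 2) = r2 := by
          have e2 : body.drop (consumed + 2) = (body.drop consumed).drop 2 := by
            rw [List.drop_drop]
          rw [e2, hdrop]; simp
        simp [e]
      | c1 :: r2 =>
        have hc1q : c1 ≠ '\'' := fun hh => h1 r2 rfl (by rw [hh])
        by_cases hc1b : c1 = '!'
        · subst hc1b
          rw [pvJump_qbang]
          have e : body.drop (consumed + 2) = r2 := by
            have e2 : body.drop (consumed + 2) = (body.drop consumed).drop 2 := by
              rw [List.drop_drop]
            rw [e2, hdrop]; simp
          simp [e]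
        · rw [pvJump_q_other hc1q hc1b]
          rw [if_neg (by simp [hc1b])]
    · rw [pvBSegLoop_shift body c hq h t consumed, ← heq]
      have hr : body.drop (consumed + 1) = r := by
        have e : body.drop (consumed + 1) = (body.drop consumed).drop 1 := by
          rw [List.drop_drop]
        rw [e, hdrop, List.drop_one, List.tail_cons]
      rw [ih (consumed + 1) hr, pvJump_cons_ne hq]

-- fallback agreement: when '!' does not occur, rsplit("!",1)[-1] is the whole string
lemma pvNoBang_takeWhile (cs : List Char) (h : ¬ cs.contains '!') :
    (cs.reverse.takeWhile (· ≠ '!')).reverse = cs := by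
  have hmem : ('!' : Char) ∉ cs := by simpa using h
  have hself : cs.reverse.takeWhile (· ≠ '!') = cs.reverse := by
    apply List.takeWhile_eq_self_iff.mpr
    intro c hc
    simp only [decide_eq_true_eq]
    intro hcb
    exact hmem (hcb ▸ List.mem_reverse.mp hc)
  rw [hself, List.reverse_reverse]

-- ===== VERDICT (by name: the statement is the Claim_ definition above) =====
theorem strip_a1_sheet_prefix_spec : Claim_equal_strip_a1_sheet_prefix := by
  intro a1 _
  unfold Spec_strip_a1_sheet_prefix strip_a1_sheet_prefix strip_a1_sheet_prefix_alt
  by_cases hs : a1.toList.headD ' ' = '\'' ∧ a1.toList ≠ []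
  · simp only [if_pos hs]
    have keyA := pvALoop_pvJump a1.toList a1.toList.length 1 (by omega)
    rw [List.drop_one] at keyA
    have keyB := pvBSegLoop_pvJump a1.toList.tail a1.toList.tail 0 (by simp)
    rw [keyB, ← keyA]
    cases hcond : (if pvALoop a1.toList 1 < a1.toList.length ∧
        pvALoop a1.toList 1 + 1 < a1.toList.length ∧
        a1.toList.getD (pvALoop a1.toList 1 + 1) ' ' = '!'
      then some (a1.toList.drop (pvALoop a1.toList 1 + 2)) else none) with
    | some r => rfl
    | none =>
      simp only []
      by_cases hb : a1.toList.contains '!'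
      · rw [if_pos hb]; rfl
      · rw [if_neg hb, pvNoBang_takeWhile _ hb]
        exact String.ofList_toList.symm
  · simp only [if_neg hs]
    by_cases hb : a1.toList.contains '!'
    · rw [if_pos hb]; rfl
    · rw [if_neg hb, pvNoBang_takeWhile _ hb]
      exact String.ofList_toList.symm
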